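-- pv_equiv track=rewrite | github.com/Forrest-Stone/skydiscover | skydiscover/budget/io.py | _ordered_fields
-- ===== SOURCE A (Python) =====
-- from typing import Any, Dict
--
-- def _ordered_fields(rows: list[Dict[str, Any]], preferred: list[str]) -> list[str]:
--     seen: set[str] = set()
--     fields: list[str] = []
--     row_keys = {key for row in rows for key in row.keys()}
--     for key in preferred:
--         if key in row_keys and key not in seen:
--             fields.append(key)
--             seen.add(key)
--     for key in sorted(row_keys - seen):
--         fields.append(key)
--     return fields
-- ===== SOURCE B (Python) =====
-- def _ordered_fields(rows, preferred):
--     rank = {}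
--     for index, key in enumerate(preferred):
--         rank.setdefault(key, index)
--     keys = {key for row in rows for key in row}
--     return sorted(keys, key=lambda k: (rank.get(k, len(preferred)), k))
-- ===== Notes on version B (the rewrite author's own statement) =====
-- stated objective: simpler
-- what changed: Replaces A's two result-building loops with a seen-set (filter preferred, then sort the leftover keys) by a single sort of the key set under the tuple key (first-index-in-preferred or sentinel len(preferred), name).
import Mathlib
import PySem

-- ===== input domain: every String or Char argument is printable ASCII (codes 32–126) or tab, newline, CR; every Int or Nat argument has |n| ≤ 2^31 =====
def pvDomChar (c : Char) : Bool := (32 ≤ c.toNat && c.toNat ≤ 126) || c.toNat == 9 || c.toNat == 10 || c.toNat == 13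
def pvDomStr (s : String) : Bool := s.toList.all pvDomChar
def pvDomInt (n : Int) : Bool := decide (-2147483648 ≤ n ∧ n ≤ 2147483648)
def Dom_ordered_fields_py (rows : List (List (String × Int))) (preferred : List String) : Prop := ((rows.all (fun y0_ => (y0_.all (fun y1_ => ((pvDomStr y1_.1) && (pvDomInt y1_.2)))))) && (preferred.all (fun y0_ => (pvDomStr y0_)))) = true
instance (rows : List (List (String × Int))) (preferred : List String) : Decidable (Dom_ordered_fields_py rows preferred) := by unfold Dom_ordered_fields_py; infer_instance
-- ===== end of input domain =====

-- B replaces A's filter-then-sort-the-rest with one sort of the key set under the key (rank, name); same result, simpler shape.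

-- ===== PORT A =====
-- {key for row in rows for key in row.keys()}: each row (a dict given as an association list)
-- contributes its keys to a set via Set.update; duplicate keys in the encoding cannot change the set.
def pvRowKeySet (rows : List (List (String × Int))) : PySem.Set String :=
  rows.foldl (fun s row => PySem.Set.update s (row.map Prod.fst)) PySem.Set.empty

def ordered_fields_py (rows : List (List (String × Int))) (preferred : List String) : List String :=
  let row_keys : PySem.Set String := pvRowKeySet rows
  let st : PySem.Set String × List String :=
    preferred.foldl (fun p key =>
      if PySem.Set.contains row_keys key && !(PySem.Set.contains p.1 key) then
        (PySem.Set.add p.1 key, p.2 ++ [key])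
      else p) (PySem.Set.empty, [])
  st.2 ++ PySem.List.sorted (PySem.Set.diff row_keys st.1) (fun x => x)

-- ===== PORT B =====
def ordered_fields_py_alt (rows : List (List (String × Int))) (preferred : List String) : List String :=
  let rank : PySem.Dict String Int :=
    (PySem.List.enumerate preferred).foldl (fun d p => PySem.Dict.setdefault d p.2 p.1) PySem.Dict.empty
  let keys : PySem.Set String := pvRowKeySet rows
  PySem.List.sorted2 keys (fun k => PySem.Dict.getD rank k (preferred.length : Int)) (fun k => k)

-- ===== PRECONDITION & SPEC =====
def Spec_ordered_fields_py (rows : List (List (String × Int))) (preferred : List String) (out : List String) : Prop := out = ordered_fields_py_alt rows preferred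
instance (rows : List (List (String × Int))) (preferred : List String) (out : List String) : Decidable (Spec_ordered_fields_py rows preferred out) := by unfold Spec_ordered_fields_py; infer_instance

-- ===== CLAIM (what is proved, stated in full; the proofs are below) =====
def Claim_equal_ordered_fields_py : Prop := ∀ (rows : List (List (String × Int))) (preferred : List String), Dom_ordered_fields_py rows preferred → Spec_ordered_fields_py rows preferred (ordered_fields_py rows preferred)

-- ===== LEMMAS AND PROOFS =====

-- The list appended by A's preferred-loop (second component) …
def pvG (K : PySem.Set String) : List String → PySem.Set String → List String
  | [], _ => []
  | k :: t, s =>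
    if PySem.Set.contains K k && !(PySem.Set.contains s k) then k :: pvG K t (PySem.Set.add s k)
    else pvG K t s

-- … and its seen-set (first component).
def pvH (K : PySem.Set String) : List String → PySem.Set String → PySem.Set String
  | [], s => s
  | k :: t, s =>
    if PySem.Set.contains K k && !(PySem.Set.contains s k) then pvH K t (PySem.Set.add s k)
    else pvH K t s

theorem pvFoldl_eq (K : PySem.Set String) (l : List String) (s : PySem.Set String) (f : List String) :
    l.foldl (fun p key =>
      if PySem.Set.contains K key && !(PySem.Set.contains p.1 key) then
        (PySem.Set.add p.1 key, p.2 ++ [key])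
      else p) (s, f) = (pvH K l s, f ++ pvG K l s) := by
  induction l generalizing s f with
  | nil => simp [pvG, pvH]
  | cons k t ih =>
    simp only [List.foldl_cons]
    cases hc : (PySem.Set.contains K k && !(PySem.Set.contains s k)) <;>
      simp only [pvG, pvH, hc, Bool.false_eq_true, if_true, if_false, ih,
        List.append_assoc, List.singleton_append]

theorem pv_mem_g (K : PySem.Set String) (l : List String) (s : PySem.Set String) (x : String) :
    x ∈ pvG K l s ↔ x ∈ l ∧ x ∈ K ∧ x ∉ s := by
  induction l generalizing s with
  | nil => simp [pvG]
  | cons k t ih =>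
    simp only [pvG]
    by_cases h : (PySem.Set.contains K k && !(PySem.Set.contains s k)) = true
    · have hk : k ∈ K ∧ k ∉ s := by
        simpa [PySem.Set.contains_iff] using h
      simp only [if_pos h, List.mem_cons, ih, PySem.Set.mem_add]
      constructor
      · rintro (rfl | ⟨ht, hK, hns⟩)
        · exact ⟨Or.inl rfl, hk.1, hk.2⟩
        · exact ⟨Or.inr ht, hK, fun hx => hns (Or.inl hx)⟩
      · rintro ⟨(rfl | ht), hK, hns⟩
        · exact Or.inl rfl
        · by_cases hxk : x = k
          · exact Or.inl hxk
          · exact Or.inr ⟨ht, hK, fun hx => hns (hx.elim id (fun h' => absurd h' hxk))⟩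
    · have hk : ¬(k ∈ K ∧ k ∉ s) := by
        intro hc
        exact h (by simp [hc.1, hc.2])
      simp only [if_neg h, List.mem_cons, ih]
      constructor
      · rintro ⟨ht, hK, hns⟩; exact ⟨Or.inr ht, hK, hns⟩
      · rintro ⟨(rfl | ht), hK, hns⟩
        · exact absurd ⟨hK, hns⟩ hk
        · exact ⟨ht, hK, hns⟩

theorem pv_mem_h (K : PySem.Set String) (l : List String) (s : PySem.Set String) (x : String) :
    x ∈ pvH K l s ↔ x ∈ s ∨ x ∈ pvG K l s := by
  induction l generalizing s with
  | nil => simp [pvG, pvH]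
  | cons k t ih =>
    simp only [pvG, pvH]
    by_cases h : (PySem.Set.contains K k && !(PySem.Set.contains s k)) = true
    · simp only [if_pos h, ih, PySem.Set.mem_add, List.mem_cons]
      tauto
    · simp only [if_neg h, ih]

theorem pv_nodup_g (K : PySem.Set String) (l : List String) (s : PySem.Set String) :
    (pvG K l s).Nodup := by
  induction l generalizing s with
  | nil => simp [pvG]
  | cons k t ih =>
    simp only [pvG]
    by_cases h : (PySem.Set.contains K k && !(PySem.Set.contains s k)) = true
    · simp only [if_pos h, List.nodup_cons]
      refine ⟨fun hk => ?_, ih _⟩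
      have := (pv_mem_g K t (PySem.Set.add s k) k).mp hk
      exact this.2.2 ((PySem.Set.mem_add _ _ _).mpr (Or.inr rfl))
    · simp only [if_neg h]
      exact ih s

theorem pv_pairwise_g (K : PySem.Set String) (l : List String) (s : PySem.Set String) :
    (pvG K l s).Pairwise (fun a b => l.idxOf a < l.idxOf b) := by
  induction l generalizing s with
  | nil => simp [pvG]
  | cons k t ih =>
    have hne : ∀ s' x, x ∈ pvG K t s' → k ∈ s' → x ≠ k := by
      intro s' x hx hks rfl
      exact ((pv_mem_g K t s' x).mp hx).2.2 hks
    simp only [pvG]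
    by_cases h : (PySem.Set.contains K k && !(PySem.Set.contains s k)) = true
    · simp only [if_pos h, List.pairwise_cons]
      constructor
      · intro b hb
        have hbk : b ≠ k := hne _ b hb ((PySem.Set.mem_add s k k).mpr (Or.inr rfl))
        simp [List.idxOf_cons_self, List.idxOf_cons_ne _ (by exact fun h' => hbk h'.symm)]
      · refine ((ih (PySem.Set.add s k)).imp_of_mem ?_)
        intro a b ha hb hab
        have hak : a ≠ k := hne _ a ha ((PySem.Set.mem_add s k k).mpr (Or.inr rfl))
        have hbk : b ≠ k := hne _ b hb ((PySem.Set.mem_add s k k).mpr (Or.inr rfl))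
        rw [List.idxOf_cons_ne _ (by exact fun h' => hak h'.symm),
            List.idxOf_cons_ne _ (by exact fun h' => hbk h'.symm)]
        omega
    · have hks : ¬(k ∈ K ∧ k ∉ s) := by
        intro hc
        exact h (by simp [hc.1, hc.2])
      simp only [if_neg h]
      refine ((ih s).imp_of_mem ?_)
      intro a b ha hb hab
      have hak : a ≠ k := by
        rintro rfl
        exact hks ⟨((pv_mem_g K t s a).mp ha).2.1, ((pv_mem_g K t s a).mp ha).2.2⟩
      have hbk : b ≠ k := by
        rintro rfl
        exact hks ⟨((pv_mem_g K t s b).mp hb).2.1, ((pv_mem_g K t s b).mp hb).2.2⟩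
      rw [List.idxOf_cons_ne _ (by exact fun h' => hak h'.symm),
          List.idxOf_cons_ne _ (by exact fun h' => hbk h'.symm)]
      omega

theorem pv_rank_getD (l : List String) (i : Int) (d : PySem.Dict String Int) (k : String) (dflt : Int) :
    ((PySem.List.enumerate l i).foldl (fun d p => PySem.Dict.setdefault d p.2 p.1) d).getD k dflt
      = if d.contains k then d.getD k dflt
        else if k ∈ l then i + (l.idxOf k : Int) else dflt := by
  induction l generalizing i d with
  | nil =>
    rw [PySem.List.enumerate_nil, List.foldl_nil]
    by_cases hd : d.contains k = true
    · simp [hd]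
    · simp only [List.not_mem_nil, if_false, Bool.not_eq_true] at *
      simp [hd, PySem.Dict.getD_of_not_contains d dflt hd]
  | cons a t ih =>
    rw [PySem.List.enumerate_cons, List.foldl_cons, ih]
    by_cases hk : k = a
    · subst hk
      by_cases hd : d.contains k = true
      · rw [PySem.Dict.setdefault_of_contains d i hd]
        simp [hd]
      · rw [Bool.not_eq_true] at hd
        rw [PySem.Dict.setdefault_of_not_contains d i hd]
        simp [PySem.Dict.contains_insert_self, hd, List.idxOf_cons_self]
    · have hcs : (d.setdefault a i).contains k = d.contains k := by
        rw [PySem.Dict.contains_setdefault]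
        simp [hk]
      have hgd : (d.setdefault a i).getD k dflt = d.getD k dflt := by
        rw [PySem.Dict.getD_eq_get?_getD, PySem.Dict.get?_setdefault_of_ne d i hk,
          ← PySem.Dict.getD_eq_get?_getD]
      rw [hcs, hgd]
      by_cases hd : d.contains k = true
      · simp [hd]
      · simp only [hd, Bool.false_eq_true, if_false, List.mem_cons, hk, false_or]
        by_cases ht : k ∈ t
        · have : List.idxOf k (a :: t) = (List.idxOf k t).succ :=
            List.idxOf_cons_ne t (fun h => hk h.symm)
          simp only [ht, if_true, this]
          push_cast
          ring
        · simp [ht]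

theorem pv_nodup_foldl_update (rows : List (List (String × Int))) (s : PySem.Set String)
    (hs : s.Nodup) : (rows.foldl (fun s row => PySem.Set.update s (row.map Prod.fst)) s).Nodup := by
  induction rows generalizing s with
  | nil => exact hs
  | cons r t ih => exact ih _ (PySem.Set.nodup_update s _ hs)

theorem pv_nodup_rowKeySet (rows : List (List (String × Int))) : (pvRowKeySet rows).Nodup := by
  unfold pvRowKeySet
  exact pv_nodup_foldl_update rows _ List.nodup_nil

theorem pv_sorted2_eq_sorted_toLex (xs : List String) (k1 : String → Int) :
    PySem.List.sorted2 xs k1 (fun k => k)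
      = PySem.List.sorted xs (fun x => toLex (k1 x, x)) := by
  unfold PySem.List.sorted2 PySem.List.sorted
  simp only [Bool.false_eq_true, if_false]
  have hb : (fun (a b : String) => (decide (k1 a < k1 b) || (!decide (k1 b < k1 a) && decide (a < b))))
      = fun a b => decide (toLex (k1 a, a) < toLex (k1 b, b)) := by
    funext a b
    rcases lt_trichotomy (k1 a) (k1 b) with h | h | h
    · simp [Prod.Lex.lt_iff, h]
    · simp [Prod.Lex.lt_iff, h]
    · simp [Prod.Lex.lt_iff, h, not_lt_of_gt h, ne_of_gt h]
  rw [hb]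

-- ===== VERDICT (by name: the statement is the Claim_ definition above) =====
theorem pv_main (rows : List (List (String × Int))) (preferred : List String) :
    ordered_fields_py rows preferred = ordered_fields_py_alt rows preferred := by
  unfold ordered_fields_py ordered_fields_py_alt
  simp only [pvFoldl_eq, List.nil_append]
  rw [pv_sorted2_eq_sorted_toLex]
  set K := pvRowKeySet rows with hKdef
  set F := pvG K preferred PySem.Set.empty with hFdef
  set S := pvH K preferred PySem.Set.empty with hSdef
  set D := PySem.Set.diff K S with hDdef
  set rnk := (PySem.List.enumerate preferred).foldl
      (fun d p => PySem.Dict.setdefault d p.2 p.1) PySem.Dict.empty with hrnk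
  have hk1 : ∀ x, PySem.Dict.getD rnk x (preferred.length : Int)
      = if x ∈ preferred then (preferred.idxOf x : Int) else (preferred.length : Int) := by
    intro x
    rw [hrnk, pv_rank_getD]
    simp [PySem.Dict.contains_empty]
  have hFmem : ∀ x, x ∈ F ↔ x ∈ preferred ∧ x ∈ K := by
    intro x
    rw [hFdef, pv_mem_g]
    simp [PySem.Set.empty]
  have hSF : ∀ x, x ∈ S ↔ x ∈ F := by
    intro x
    rw [hSdef, pv_mem_h, hFdef]
    simp [PySem.Set.empty]
  have hKnd : K.Nodup := pv_nodup_rowKeySet rows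
  have hFnd : F.Nodup := pv_nodup_g K preferred PySem.Set.empty
  have hDnd : D.Nodup := PySem.Set.nodup_diff K S hKnd
  have hDmem : ∀ x, x ∈ D ↔ x ∈ K ∧ x ∉ F := by
    intro x
    rw [hDdef, PySem.Set.mem_diff]
    simp [hSF]
  have hsp : (PySem.List.sorted D (fun x => x)).Perm D := PySem.List.sorted_perm D _ false
  have hsnd : (PySem.List.sorted D (fun x => x)).Nodup := hsp.nodup_iff.mpr hDnd
  have hand : (F ++ PySem.List.sorted D (fun x => x)).Nodup := by
    rw [List.nodup_append]
    refine ⟨hFnd, hsnd, ?_⟩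
    intro a ha b hb
    rintro rfl
    have : a ∈ D := (PySem.List.mem_sorted D (fun x => x) false a).mp hb
    exact ((hDmem a).mp this).2 ha
  have hperm : (F ++ PySem.List.sorted D (fun x => x)).Perm K := by
    rw [List.perm_ext_iff_of_nodup hand hKnd]
    intro a
    simp only [List.mem_append, PySem.List.mem_sorted, hDmem]
    constructor
    · rintro (ha | ⟨ha, _⟩)
      · exact ((hFmem a).mp ha).2
      · exact ha
    · intro ha
      by_cases hf : a ∈ F
      · exact Or.inl hf
      · exact Or.inr ⟨ha, hf⟩
  have hpair : (F ++ PySem.List.sorted D (fun x => x)).Pairwise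
      (fun a b => (toLex (PySem.Dict.getD rnk a (preferred.length : Int), a))
                < (toLex (PySem.Dict.getD rnk b (preferred.length : Int), b))) := by
    rw [List.pairwise_append]
    have hnotpref : ∀ a ∈ PySem.List.sorted D (fun x => x), a ∉ preferred := by
      intro a ha hp
      have haD := (PySem.List.mem_sorted D (fun x => x) false a).mp ha
      exact ((hDmem a).mp haD).2 ((hFmem a).mpr ⟨hp, ((hDmem a).mp haD).1⟩)
    refine ⟨?_, ?_, ?_⟩
    · refine (pv_pairwise_g K preferred PySem.Set.empty).imp_of_mem ?_
      intro a b ha hb hab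
      simp only [Prod.Lex.lt_iff, ofLex_toLex]
      left
      rw [hk1 a, hk1 b, if_pos ((hFmem a).mp ha).1, if_pos ((hFmem b).mp hb).1]
      exact_mod_cast hab
    · have hle := PySem.List.sorted_pairwise D (fun x => x)
      have hne : (PySem.List.sorted D (fun x => x)).Pairwise (· ≠ ·) := hsnd
      refine (hle.and hne).imp_of_mem ?_
      intro a b ha hb hab
      simp only [Prod.Lex.lt_iff, ofLex_toLex]
      right
      rw [hk1 a, hk1 b, if_neg (hnotpref a ha), if_neg (hnotpref b hb)]
      exact ⟨rfl, lt_of_le_of_ne hab.1 hab.2⟩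
    · intro a ha b hb
      simp only [Prod.Lex.lt_iff, ofLex_toLex]
      left
      rw [hk1 a, hk1 b, if_pos ((hFmem a).mp ha).1, if_neg (hnotpref b hb)]
      exact_mod_cast List.idxOf_lt_length_of_mem ((hFmem a).mp ha).1
  exact (PySem.List.sorted_eq_of_perm_of_pairwise_lt K _ _ hperm hpair).symm

-- ===== VERDICT (real) =====
theorem ordered_fields_py_spec : Claim_equal_ordered_fields_py := by
  intro rows preferred _
  exact pv_main rows preferred
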